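-- pv_equiv track=rewrite | github.com/jon-chun/dev-setup | git-flow/file-diff-pr-template.py | process_hunk_lines
-- ===== SOURCE A (Python) =====
-- def process_hunk_lines(hunk_lines, start_old, start_new):
--     res = []
--     i = 0
--     current_old = start_old
--     current_new = start_new
--     while i < len(hunk_lines):
--         if hunk_lines[i].startswith(' '):
--             current_old += 1
--             current_new += 1
--             i += 1
--             continue
--
--         change_start_old = current_old
--         change_start_new = current_new
--
--         removes = []
--         while i < len(hunk_lines) and hunk_lines[i].startswith('-'):
--             removes.append(hunk_lines[i][1:])
--             i += 1
--             current_old += 1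
--
--         adds = []
--         while i < len(hunk_lines) and hunk_lines[i].startswith('+'):
--             adds.append(hunk_lines[i][1:])
--             i += 1
--             current_new += 1
--
--         if removes and adds:
--             res.append(f"  Modified at line {change_start_old} (original) / {change_start_new} (updated):")
--             if len(removes) == len(adds) == 1:
--                 res.append(f"    From: {removes[0].rstrip()}")
--                 res.append(f"    To:   {adds[0].rstrip()}")
--             else:
--                 res.append("    Removed:")
--                 for r in removes:
--                     res.append(f"      {r.rstrip()}")
--                 res.append("    Added:")
--                 for a in adds:
--                     res.append(f"      {a.rstrip()}")
--         elif removes: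
--             res.append(f"  Removed at line {change_start_old}:")
--             for r in removes:
--                 res.append(f"    {r.rstrip()}")
--         elif adds:
--             res.append(f"  Added at line {change_start_new}:")
--             for a in adds:
--                 res.append(f"    {a.rstrip()}")
--
--     return res
-- ===== SOURCE B (Python) =====
-- def process_hunk_lines(hunk_lines, start_old, start_new):
--     # Phase 1: one pass over the lines with a small state machine, collecting
--     # change records (start_old, start_new, removed bodies, added bodies).
--     old, new = start_old, start_new
--     records = []
--     cur = None  # open record: (rec_old, rec_new, removes, adds)
--     for line in hunk_lines:
--         body = line[1:]
--         if line.startswith(' '):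
--             if cur is not None:
--                 records.append(cur)
--                 cur = None
--             old += 1
--             new += 1
--         elif line.startswith('-'):
--             if cur is not None and cur[3]:
--                 records.append(cur)
--                 cur = None
--             if cur is None:
--                 cur = (old, new, [], [])
--             cur[2].append(body)
--             old += 1
--         elif line.startswith('+'):
--             if cur is None:
--                 cur = (old, new, [], [])
--             cur[3].append(body)
--             new += 1
--     if cur is not None:
--         records.append(cur)
--     # Phase 2: format each record.
--     res = []
--     for rec_old, rec_new, removes, adds in records:
--         if removes and adds:
--             if len(removes) == len(adds) == 1:
--                 body = ["    From: " + removes[0].rstrip(),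
--                         "    To:   " + adds[0].rstrip()]
--             else:
--                 body = (["    Removed:"] + ["      " + r.rstrip() for r in removes]
--                         + ["    Added:"] + ["      " + a.rstrip() for a in adds])
--             res += ["  Modified at line %d (original) / %d (updated):" % (rec_old, rec_new)] + body
--         elif removes:
--             res += ["  Removed at line %d:" % rec_old] + ["    " + r.rstrip() for r in removes]
--         elif adds:
--             res += ["  Added at line %d:" % rec_new] + ["    " + a.rstrip() for a in adds]
--     return res
-- ===== Notes on version B (the rewrite author's own statement) =====
-- stated objective: alternative
-- what changed: Replaced A's index-based while loop with nested prefix-scans and inline formatting by a two-phase design: a single for-loop state machine that collects change records, followed by a separate formatting pass built from list concatenation and comprehensions.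
import Mathlib
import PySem

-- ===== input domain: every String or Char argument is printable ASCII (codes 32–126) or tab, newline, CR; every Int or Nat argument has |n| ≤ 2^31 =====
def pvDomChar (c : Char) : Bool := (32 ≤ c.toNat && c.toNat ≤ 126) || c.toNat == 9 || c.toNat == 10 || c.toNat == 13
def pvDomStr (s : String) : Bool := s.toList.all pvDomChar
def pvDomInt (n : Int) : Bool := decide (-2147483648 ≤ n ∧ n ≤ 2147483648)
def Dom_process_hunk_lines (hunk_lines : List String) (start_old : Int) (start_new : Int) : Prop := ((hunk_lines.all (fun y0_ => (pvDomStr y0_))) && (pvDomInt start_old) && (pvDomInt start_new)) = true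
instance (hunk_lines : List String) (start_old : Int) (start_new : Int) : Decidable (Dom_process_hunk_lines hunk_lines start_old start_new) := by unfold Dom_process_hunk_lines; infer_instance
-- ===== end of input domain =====

-- B replaces A's index-based while loop with nested prefix scans and inline formatting by a
-- two-phase design (state-machine parse into records, then a separate formatting pass); same cost.

-- ===== PORT A =====
-- inner 'while … startswith("-")' loop of A: collects the bodies of the '-' lines, returns the rest
def phlA_spanMinus : List String → (List String × List String)
  | [] => ([], [])
  | l :: ls =>
    if PySem.Str.startswith l "-" then
      let p := phlA_spanMinus ls
      (PySem.Str.slice l (some 1) none :: p.1, p.2)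
    else ([], l :: ls)

-- inner 'while … startswith("+")' loop of A
def phlA_spanPlus : List String → (List String × List String)
  | [] => ([], [])
  | l :: ls =>
    if PySem.Str.startswith l "+" then
      let p := phlA_spanPlus ls
      (PySem.Str.slice l (some 1) none :: p.1, p.2)
    else ([], l :: ls)

-- A's outer while loop over index i, modelled on the remaining suffix; fuel only makes the
-- function total: where Python loops forever (a line starting with none of ' ', '-', '+' —
-- excluded by Pre_) the fuel runs out.
def phlA_loop : Nat → List String → Int → Int → List String → List String
  | 0, _, _, _, res => res
  | _ + 1, [], _, _, res => res
  | f + 1, l :: ls, current_old, current_new, res =>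
    if PySem.Str.startswith l " " then
      phlA_loop f ls (current_old + 1) (current_new + 1) res
    else
      let change_start_old := current_old
      let change_start_new := current_new
      let p1 := phlA_spanMinus (l :: ls)
      let removes := p1.1
      let p2 := phlA_spanPlus p1.2
      let adds := p2.1
      let res' :=
        if removes ≠ [] ∧ adds ≠ [] then
          let res1 := res ++ ["  Modified at line " ++ PySem.Int.toStr change_start_old ++ " (original) / " ++ PySem.Int.toStr change_start_new ++ " (updated):"]
          if removes.length = 1 ∧ adds.length = 1 then
            res1 ++ ["    From: " ++ PySem.Str.rstrip removes.headI] ++ ["    To:   " ++ PySem.Str.rstrip adds.headI]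
          else
            let res2 := res1 ++ ["    Removed:"]
            let res3 := removes.foldl (fun acc r => acc ++ ["      " ++ PySem.Str.rstrip r]) res2
            let res4 := res3 ++ ["    Added:"]
            adds.foldl (fun acc a => acc ++ ["      " ++ PySem.Str.rstrip a]) res4
        else if removes ≠ [] then
          removes.foldl (fun acc r => acc ++ ["    " ++ PySem.Str.rstrip r]) (res ++ ["  Removed at line " ++ PySem.Int.toStr change_start_old ++ ":"])
        else if adds ≠ [] then
          adds.foldl (fun acc a => acc ++ ["    " ++ PySem.Str.rstrip a]) (res ++ ["  Added at line " ++ PySem.Int.toStr change_start_new ++ ":"])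
        else res
      phlA_loop f p2.2 (current_old + removes.length) (current_new + adds.length) res'

def process_hunk_lines (hunk_lines : List String) (start_old : Int) (start_new : Int) : List String :=
  phlA_loop (hunk_lines.length + 1) hunk_lines start_old start_new []

-- ===== PORT B =====
-- a change record: (rec_old, rec_new, removes, adds)
abbrev PhlRec := Int × Int × List String × List String

-- one step of B's phase-1 state machine; state = (old, new, closed records, open record)
def phlB_step (st : Int × Int × List PhlRec × Option PhlRec) (line : String) :
    Int × Int × List PhlRec × Option PhlRec :=
  let (old, new, records, cur) := st
  let body := PySem.Str.slice line (some 1) none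
  if PySem.Str.startswith line " " then
    match cur with
    | some rec => (old + 1, new + 1, records ++ [rec], none)
    | none => (old + 1, new + 1, records, none)
  else if PySem.Str.startswith line "-" then
    match cur with
    | some (o, n, rs, as) =>
      if as ≠ [] then (old + 1, new, records ++ [(o, n, rs, as)], some (old, new, [body], ([] : List String)))
      else (old + 1, new, records, some (o, n, rs ++ [body], as))
    | none => (old + 1, new, records, some (old, new, [body], ([] : List String)))
  else if PySem.Str.startswith line "+" then
    match cur with
    | some (o, n, rs, as) => (old, new + 1, records, some (o, n, rs, as ++ [body]))
    | none => (old, new + 1, records, some (old, new, ([] : List String), [body]))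
  else st

-- 'if cur is not None: records.append(cur)' after the loop
def phlB_finish (records : List PhlRec) (cur : Option PhlRec) : List PhlRec :=
  match cur with
  | some rec => records ++ [rec]
  | none => records

-- B's phase-2 formatting of one record
def phlB_fmtRec (r : PhlRec) : List String :=
  let (rec_old, rec_new, removes, adds) := r
  if removes ≠ [] ∧ adds ≠ [] then
    let body :=
      if removes.length = 1 ∧ adds.length = 1 then
        ["    From: " ++ PySem.Str.rstrip removes.headI, "    To:   " ++ PySem.Str.rstrip adds.headI]
      else
        ["    Removed:"] ++ removes.map (fun r => "      " ++ PySem.Str.rstrip r)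
          ++ ["    Added:"] ++ adds.map (fun a => "      " ++ PySem.Str.rstrip a)
    ["  Modified at line " ++ PySem.Int.toStr rec_old ++ " (original) / " ++ PySem.Int.toStr rec_new ++ " (updated):"] ++ body
  else if removes ≠ [] then
    ["  Removed at line " ++ PySem.Int.toStr rec_old ++ ":"] ++ removes.map (fun r => "    " ++ PySem.Str.rstrip r)
  else if adds ≠ [] then
    ["  Added at line " ++ PySem.Int.toStr rec_new ++ ":"] ++ adds.map (fun a => "    " ++ PySem.Str.rstrip a)
  else []

def process_hunk_lines_alt (hunk_lines : List String) (start_old : Int) (start_new : Int) : List String :=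
  let st := hunk_lines.foldl phlB_step (start_old, start_new, ([] : List PhlRec), (none : Option PhlRec))
  let records := phlB_finish st.2.2.1 st.2.2.2
  records.foldl (fun res r => res ++ phlB_fmtRec r) []

-- ===== PRECONDITION & SPEC =====
-- Pre_ excludes inputs containing a line that starts with none of ' ', '-', '+' (in particular an
-- empty line): on those A's while loop stops advancing i and never returns (infinite loop).
def Pre_process_hunk_lines (hunk_lines : List String) (start_old : Int) (start_new : Int) : Prop :=
  ∀ l ∈ hunk_lines,
    (PySem.Str.startswith l " " || PySem.Str.startswith l "-" || PySem.Str.startswith l "+") = true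
instance (hunk_lines : List String) (start_old : Int) (start_new : Int) : Decidable (Pre_process_hunk_lines hunk_lines start_old start_new) := by unfold Pre_process_hunk_lines; infer_instance

def pvWitness_process_hunk_lines : List String × Int × Int := ([" keep", "-old line", "+new line", "+more"], 3, 4)

def Spec_process_hunk_lines (hunk_lines : List String) (start_old : Int) (start_new : Int) (out : List String) : Prop := out = process_hunk_lines_alt hunk_lines start_old start_new
instance (hunk_lines : List String) (start_old : Int) (start_new : Int) (out : List String) : Decidable (Spec_process_hunk_lines hunk_lines start_old start_new out) := by unfold Spec_process_hunk_lines; infer_instance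

-- ===== CLAIM (what is proved, stated in full; the proofs are below) =====
def Claim_equal_process_hunk_lines : Prop := ∀ (hunk_lines : List String) (start_old : Int) (start_new : Int), Dom_process_hunk_lines hunk_lines start_old start_new → Pre_process_hunk_lines hunk_lines start_old start_new → Spec_process_hunk_lines hunk_lines start_old start_new (process_hunk_lines hunk_lines start_old start_new)

-- ===== LEMMAS AND PROOFS =====

-- a "good" line: one on which A's loop makes progress
def phlGood (l : String) : Prop :=
  (PySem.Str.startswith l " " || PySem.Str.startswith l "-" || PySem.Str.startswith l "+") = true

-- two distinct single-character prefixes cannot both start the same string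
theorem phl_sw_disj {l : String} {c₁ c₂ : Char} (h : c₁ ≠ c₂)
    (h₁ : PySem.Chars.startswith l.toList [c₁] = true) :
    PySem.Chars.startswith l.toList [c₂] = false := by
  simp only [PySem.Chars.startswith] at *
  generalize l.toList = cs at h₁ ⊢
  cases cs with
  | nil => simp [List.isPrefixOf] at h₁
  | cons a cs =>
    have ha : c₁ = a := by simpa [List.isPrefixOf] using h₁
    subst ha
    simp [List.isPrefixOf, Ne.symm h]

theorem phlA_spanMinus_len (ls : List String) :
    (phlA_spanMinus ls).1.length + (phlA_spanMinus ls).2.length = ls.length := by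
  induction ls with
  | nil => simp [phlA_spanMinus]
  | cons l ls ih =>
    simp only [phlA_spanMinus]
    split
    · simp only [List.length_cons]; omega
    · simp

theorem phlA_spanPlus_len (ls : List String) :
    (phlA_spanPlus ls).1.length + (phlA_spanPlus ls).2.length = ls.length := by
  induction ls with
  | nil => simp [phlA_spanPlus]
  | cons l ls ih =>
    simp only [phlA_spanPlus]
    split
    · simp only [List.length_cons]; omega
    · simp

theorem phlA_spanMinus_rest_mem (ls : List String) :
    ∀ x ∈ (phlA_spanMinus ls).2, x ∈ ls := by
  induction ls with
  | nil => simp [phlA_spanMinus]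
  | cons l ls ih =>
    simp only [phlA_spanMinus]
    split
    · intro x hx; exact List.mem_cons_of_mem _ (ih x hx)
    · intro x hx; simpa using hx

theorem phlA_spanPlus_rest_mem (ls : List String) :
    ∀ x ∈ (phlA_spanPlus ls).2, x ∈ ls := by
  induction ls with
  | nil => simp [phlA_spanPlus]
  | cons l ls ih =>
    simp only [phlA_spanPlus]
    split
    · intro x hx; exact List.mem_cons_of_mem _ (ih x hx)
    · intro x hx; simpa using hx

theorem phlA_spanMinus_rest_head (ls : List String) :
    ∀ x ∈ (phlA_spanMinus ls).2.head?, PySem.Str.startswith x "-" = false := by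
  induction ls with
  | nil => simp [phlA_spanMinus]
  | cons l ls ih =>
    simp only [phlA_spanMinus]
    split
    · exact ih
    · intro x hx
      simp only [List.head?_cons, Option.mem_def, Option.some.injEq] at hx
      subst hx; simp_all

theorem phlA_spanPlus_rest_head (ls : List String) :
    ∀ x ∈ (phlA_spanPlus ls).2.head?, PySem.Str.startswith x "+" = false := by
  induction ls with
  | nil => simp [phlA_spanPlus]
  | cons l ls ih =>
    simp only [phlA_spanPlus]
    split
    · exact ih
    · intro x hx
      simp only [List.head?_cons, Option.mem_def, Option.some.injEq] at hx
      subst hx; simp_all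

-- an empty '+' span leaves the list unchanged
theorem phlA_spanPlus_nil_rest (ls : List String) (h : (phlA_spanPlus ls).1 = []) :
    (phlA_spanPlus ls).2 = ls := by
  cases ls with
  | nil => simp [phlA_spanPlus]
  | cons l ls =>
    by_cases hp : PySem.Str.startswith l "+" = true
    · exfalso
      simp only [phlA_spanPlus] at h
      rw [if_pos hp] at h
      simp at h
    · simp only [phlA_spanPlus]
      rw [if_neg hp]

-- on a good line that is no context line, the two spans together consume at least the head
theorem phl_span_progress (l : String) (ls : List String)
    (hg : phlGood l) (hsp : ¬ PySem.Str.startswith l " " = true) :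
    (phlA_spanPlus (phlA_spanMinus (l :: ls)).2).2.length < ls.length + 1 := by
  have hlm : PySem.Str.startswith l "-" = true ∨ PySem.Str.startswith l "+" = true := by
    unfold phlGood at hg; simp at hg; tauto
  have hlen1 := phlA_spanMinus_len (l :: ls)
  have hlen2 := phlA_spanPlus_len (phlA_spanMinus (l :: ls)).2
  have hcons : 1 ≤ (phlA_spanMinus (l :: ls)).1.length + (phlA_spanPlus (phlA_spanMinus (l :: ls)).2).1.length := by
    rcases hlm with hm | hp
    · simp only [phlA_spanMinus]
      rw [if_pos hm]
      simp only [List.length_cons]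
      omega
    · have hm : ¬ PySem.Str.startswith l "-" = true := by
        have : PySem.Chars.startswith l.toList ['-'] = false := phl_sw_disj (by decide) hp
        simpa [PySem.Str.startswith] using this
      have h1 : phlA_spanMinus (l :: ls) = ([], l :: ls) := by
        simp only [phlA_spanMinus]
        rw [if_neg hm]
      rw [h1]
      simp only [phlA_spanPlus]
      rw [if_pos hp]
      simp only [List.length_cons]
      omega
  simp only [List.length_cons] at hlen1
  omega

-- common reference shape: the list of change records, structured like A's outer loop
def phlParse : List String → Int → Int → List PhlRec
  | [], _, _ => []
  | l :: ls, old, new =>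
    if PySem.Str.startswith l " " then phlParse ls (old + 1) (new + 1)
    else
      let p1 := phlA_spanMinus (l :: ls)
      let p2 := phlA_spanPlus p1.2
      if h : (phlA_spanPlus (phlA_spanMinus (l :: ls)).2).2.length < (l :: ls).length then
        (old, new, (phlA_spanMinus (l :: ls)).1, (phlA_spanPlus (phlA_spanMinus (l :: ls)).2).1) ::
          phlParse (phlA_spanPlus (phlA_spanMinus (l :: ls)).2).2
            (old + (phlA_spanMinus (l :: ls)).1.length)
            (new + (phlA_spanPlus (phlA_spanMinus (l :: ls)).2).1.length)
      else []
termination_by ls _ _ => ls.length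
decreasing_by all_goals first | assumption | simp

theorem phlParse_nil (old new : Int) : phlParse [] old new = [] := by
  rw [phlParse.eq_def]

theorem phlParse_cons_sp (l : String) (ls : List String) (old new : Int)
    (hsp : PySem.Str.startswith l " " = true) :
    phlParse (l :: ls) old new = phlParse ls (old + 1) (new + 1) := by
  have hspC : PySem.Chars.startswith l.toList [' '] = true := hsp
  rw [phlParse.eq_def]
  simp [hspC]

theorem phlParse_cons_grp (l : String) (ls : List String) (old new : Int)
    (hsp : ¬ PySem.Str.startswith l " " = true)
    (h : (phlA_spanPlus (phlA_spanMinus (l :: ls)).2).2.length < (l :: ls).length) :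
    phlParse (l :: ls) old new =
      (old, new, (phlA_spanMinus (l :: ls)).1, (phlA_spanPlus (phlA_spanMinus (l :: ls)).2).1) ::
        phlParse (phlA_spanPlus (phlA_spanMinus (l :: ls)).2).2
          (old + (phlA_spanMinus (l :: ls)).1.length)
          (new + (phlA_spanPlus (phlA_spanMinus (l :: ls)).2).1.length) := by
  have hspC : PySem.Chars.startswith l.toList [' '] = false := eq_false_of_ne_true hsp
  have h' : (phlA_spanPlus (phlA_spanMinus (l :: ls)).2).2.length ≤ ls.length := by
    simpa using h
  rw [phlParse.eq_def]
  simp [hspC, h']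

-- ===== A side: A's fueled loop computes the formatted phlParse records =====

theorem phlA_loop_eq (f : Nat) :
    ∀ (ls : List String) (old new : Int) (res : List String),
      (∀ l ∈ ls, phlGood l) → ls.length + 1 ≤ f →
      phlA_loop f ls old new res = res ++ (phlParse ls old new).flatMap phlB_fmtRec := by
  induction f with
  | zero => intro ls old new res _ h; omega
  | succ f ih =>
    intro ls old new res hgood hlen
    match ls with
    | [] => simp [phlA_loop, phlParse_nil]
    | l :: ls =>
      by_cases hsp : PySem.Str.startswith l " " = true
      · rw [phlA_loop, phlParse_cons_sp l ls old new hsp]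
        rw [if_pos hsp]
        exact ih ls (old + 1) (new + 1) res
          (fun x hx => hgood x (List.mem_cons_of_mem _ hx)) (by simp at hlen ⊢; omega)
      · have hg := hgood l (List.mem_cons_self ..)
        have hrest := phl_span_progress l ls hg hsp
        rw [phlA_loop, phlParse_cons_grp l ls old new hsp (by simpa using hrest)]
        rw [if_neg hsp]
        have hgoodrest : ∀ x ∈ (phlA_spanPlus (phlA_spanMinus (l :: ls)).2).2, phlGood x :=
          fun x hx => hgood x (phlA_spanMinus_rest_mem _ x (phlA_spanPlus_rest_mem _ x hx))
        rw [ih _ _ _ _ hgoodrest (by simp at hlen; omega)]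
        rw [List.flatMap_cons, ← List.append_assoc]
        congr 1
        generalize (phlA_spanMinus (l :: ls)).1 = removes
        generalize (phlA_spanPlus (phlA_spanMinus (l :: ls)).2).1 = adds
        simp only [phlB_fmtRec]
        by_cases hra : removes ≠ [] ∧ adds ≠ []
        · rw [if_pos hra, if_pos hra]
          by_cases h11 : removes.length = 1 ∧ adds.length = 1
          · rw [if_pos h11, if_pos h11]; simp
          · rw [if_neg h11, if_neg h11]
            simp only [PySem.List.foldl_append_singleton_eq_map]
            simp
        · rw [if_neg hra, if_neg hra]
          by_cases hr : removes ≠ []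
          · rw [if_pos hr, if_pos hr]
            simp only [PySem.List.foldl_append_singleton_eq_map]
            simp
          · rw [if_neg hr, if_neg hr]
            by_cases ha : adds ≠ []
            · rw [if_pos ha, if_pos ha]
              simp only [PySem.List.foldl_append_singleton_eq_map]
              simp
            · rw [if_neg ha, if_neg ha]
              simp

-- ===== B side: the state machine's records are phlParse =====

def phlRecsOf (st : Int × Int × List PhlRec × Option PhlRec) : List PhlRec :=
  phlB_finish st.2.2.1 st.2.2.2

-- folding B's step through a '-' span extends the open record's removes
theorem phlB_fold_minus (ls : List String) :
    ∀ (o n : Int) (rs : List String) (old new : Int) (recs : List PhlRec),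
      List.foldl phlB_step (old, new, recs, some (o, n, rs, ([] : List String))) ls =
      List.foldl phlB_step
        (old + (phlA_spanMinus ls).1.length, new, recs,
          some (o, n, rs ++ (phlA_spanMinus ls).1, ([] : List String)))
        (phlA_spanMinus ls).2 := by
  induction ls with
  | nil => simp [phlA_spanMinus]
  | cons l ls ih =>
    intro o n rs old new recs
    by_cases hm : PySem.Str.startswith l "-" = true
    · have hsp : ¬ PySem.Str.startswith l " " = true := by
        have : PySem.Chars.startswith l.toList [' '] = false := phl_sw_disj (by decide) hm
        simpa [PySem.Str.startswith] using this
      simp only [phlA_spanMinus]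
      rw [if_pos hm]
      simp only [List.foldl_cons]
      have hspC : PySem.Chars.startswith l.toList [' '] = false := eq_false_of_ne_true hsp
      have hmC : PySem.Chars.startswith l.toList ['-'] = true := hm
      have hstep : phlB_step (old, new, recs, some (o, n, rs, ([] : List String))) l =
          (old + 1, new, recs, some (o, n, rs ++ [PySem.Str.slice l (some 1) none], ([] : List String))) := by
        simp [phlB_step, hspC, hmC]
      rw [hstep, ih]
      have h1 : old + 1 + ((phlA_spanMinus ls).1.length : Int) =
          old + (((PySem.Str.slice l (some 1) none :: (phlA_spanMinus ls).1).length : Nat) : Int) := by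
        simp only [List.length_cons]; push_cast; ring
      have h2 : (rs ++ [PySem.Str.slice l (some 1) none]) ++ (phlA_spanMinus ls).1 =
          rs ++ (PySem.Str.slice l (some 1) none :: (phlA_spanMinus ls).1) := by
        simp
      rw [h1, h2]
    · simp only [phlA_spanMinus]
      rw [if_neg hm]
      simp

-- folding B's step through a '+' span extends the open record's adds
theorem phlB_fold_plus (ls : List String) :
    ∀ (o n : Int) (rs as : List String) (old new : Int) (recs : List PhlRec),
      List.foldl phlB_step (old, new, recs, some (o, n, rs, as)) ls =
      List.foldl phlB_step
        (old, new + (phlA_spanPlus ls).1.length, recs,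
          some (o, n, rs, as ++ (phlA_spanPlus ls).1))
        (phlA_spanPlus ls).2 := by
  induction ls with
  | nil => simp [phlA_spanPlus]
  | cons l ls ih =>
    intro o n rs as old new recs
    by_cases hp : PySem.Str.startswith l "+" = true
    · have hsp : ¬ PySem.Str.startswith l " " = true := by
        have : PySem.Chars.startswith l.toList [' '] = false := phl_sw_disj (by decide) hp
        simpa [PySem.Str.startswith] using this
      have hm : ¬ PySem.Str.startswith l "-" = true := by
        have : PySem.Chars.startswith l.toList ['-'] = false := phl_sw_disj (by decide) hp
        simpa [PySem.Str.startswith] using this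
      simp only [phlA_spanPlus]
      rw [if_pos hp]
      simp only [List.foldl_cons]
      have hspC : PySem.Chars.startswith l.toList [' '] = false := eq_false_of_ne_true hsp
      have hmC : PySem.Chars.startswith l.toList ['-'] = false := eq_false_of_ne_true hm
      have hpC : PySem.Chars.startswith l.toList ['+'] = true := hp
      have hstep : phlB_step (old, new, recs, some (o, n, rs, as)) l =
          (old, new + 1, recs, some (o, n, rs, as ++ [PySem.Str.slice l (some 1) none])) := by
        simp [phlB_step, hspC, hmC, hpC]
      rw [hstep, ih]
      have h1 : new + 1 + ((phlA_spanPlus ls).1.length : Int) =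
          new + (((PySem.Str.slice l (some 1) none :: (phlA_spanPlus ls).1).length : Nat) : Int) := by
        simp only [List.length_cons]; push_cast; ring
      have h2 : (as ++ [PySem.Str.slice l (some 1) none]) ++ (phlA_spanPlus ls).1 =
          as ++ (PySem.Str.slice l (some 1) none :: (phlA_spanPlus ls).1) := by
        simp
      rw [h1, h2]
    · simp only [phlA_spanPlus]
      rw [if_neg hp]
      simp

-- once the next line cannot extend the open record, carrying it open or closed is the same
theorem phlB_close (ls : List String) (o n : Int) (rs as : List String)
    (old new : Int) (recs : List PhlRec)
    (hgood : ∀ l ∈ ls, phlGood l)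
    (hhead : ∀ x ∈ ls.head?, PySem.Str.startswith x "+" = false ∧
      (PySem.Str.startswith x "-" = true → as ≠ [])) :
    phlRecsOf (List.foldl phlB_step (old, new, recs, some (o, n, rs, as)) ls) =
    phlRecsOf (List.foldl phlB_step (old, new, recs ++ [(o, n, rs, as)], none) ls) := by
  cases ls with
  | nil => simp [phlRecsOf, phlB_finish]
  | cons l ls =>
    obtain ⟨hp, hm⟩ := hhead l (by simp)
    have hpC : PySem.Chars.startswith l.toList ['+'] = false := hp
    have hp' : ¬ PySem.Str.startswith l "+" = true := by simp [hpC]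
    by_cases hsp : PySem.Str.startswith l " " = true
    · simp only [List.foldl_cons]
      have hspC : PySem.Chars.startswith l.toList [' '] = true := hsp
      have : phlB_step (old, new, recs, some (o, n, rs, as)) l =
          phlB_step (old, new, recs ++ [(o, n, rs, as)], none) l := by
        simp [phlB_step, hspC]
      rw [this]
    · by_cases hmm : PySem.Str.startswith l "-" = true
      · have has := hm hmm
        simp only [List.foldl_cons]
        have hspC : PySem.Chars.startswith l.toList [' '] = false := eq_false_of_ne_true hsp
        have hmmC : PySem.Chars.startswith l.toList ['-'] = true := hmm
        have : phlB_step (old, new, recs, some (o, n, rs, as)) l =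
            phlB_step (old, new, recs ++ [(o, n, rs, as)], none) l := by
          simp [phlB_step, hspC, hmmC, has]
        rw [this]
      · exfalso
        have hg := hgood l (List.mem_cons_self ..)
        have hspC : PySem.Chars.startswith l.toList [' '] = false := eq_false_of_ne_true hsp
        have hmmC : PySem.Chars.startswith l.toList ['-'] = false := eq_false_of_ne_true hmm
        unfold phlGood at hg
        simp [hspC, hmmC, hpC] at hg

-- opening a record on a '-' or '+' line equals starting from an empty open record
theorem phlB_open (l : String) (ls : List String) (old new : Int) (recs : List PhlRec)
    (hsp : ¬ PySem.Str.startswith l " " = true) (hg : phlGood l) :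
    List.foldl phlB_step (old, new, recs, none) (l :: ls) =
    List.foldl phlB_step (old, new, recs, some (old, new, ([] : List String), ([] : List String))) (l :: ls) := by
  simp only [List.foldl_cons]
  have hspC : PySem.Chars.startswith l.toList [' '] = false := eq_false_of_ne_true hsp
  by_cases hm : PySem.Chars.startswith l.toList ['-'] = true
  · have : phlB_step (old, new, recs, none) l =
        phlB_step (old, new, recs, some (old, new, ([] : List String), ([] : List String))) l := by
      simp [phlB_step, hspC, hm]
    rw [this]
  · have hmC : PySem.Chars.startswith l.toList ['-'] = false := eq_false_of_ne_true hm
    by_cases hp : PySem.Chars.startswith l.toList ['+'] = true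
    · have : phlB_step (old, new, recs, none) l =
          phlB_step (old, new, recs, some (old, new, ([] : List String), ([] : List String))) l := by
        simp [phlB_step, hspC, hmC, hp]
      rw [this]
    · exfalso
      have hpC : PySem.Chars.startswith l.toList ['+'] = false := eq_false_of_ne_true hp
      unfold phlGood at hg
      simp [hspC, hmC, hpC] at hg

-- B's phase 1 from a closed state computes phlParse
theorem phlB_fold_eq (ls : List String) (old new : Int) (recs : List PhlRec)
    (hgood : ∀ l ∈ ls, phlGood l) :
    phlRecsOf (List.foldl phlB_step (old, new, recs, none) ls) =
    recs ++ phlParse ls old new := by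
  induction ls, old, new using phlParse.induct generalizing recs with
  | case1 old new => simp [phlRecsOf, phlB_finish, phlParse_nil]
  | case2 l ls old new hsp ih =>
    rw [phlParse_cons_sp l ls old new hsp]
    simp only [List.foldl_cons]
    have hspC : PySem.Chars.startswith l.toList [' '] = true := hsp
    have : phlB_step (old, new, recs, none) l = (old + 1, new + 1, recs, none) := by
      simp [phlB_step, hspC]
    rw [this]
    exact ih recs (fun x hx => hgood x (List.mem_cons_of_mem _ hx))
  | case3 l ls old new hsp hlt ih =>
    rw [phlParse_cons_grp l ls old new hsp hlt]
    rw [phlB_open l ls old new recs hsp (hgood l (List.mem_cons_self ..))]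
    rw [phlB_fold_minus (l :: ls) old new [] old new recs]
    rw [phlB_fold_plus _ old new _ _ _ _ recs]
    simp only [List.nil_append]
    rw [phlB_close _ old new _ _ _ _ recs
      (fun x hx => hgood x (phlA_spanMinus_rest_mem _ x (phlA_spanPlus_rest_mem _ x hx)))
      (by
        intro x hx
        refine ⟨phlA_spanPlus_rest_head _ x hx, ?_⟩
        intro hmm hadds
        have h2 := phlA_spanPlus_nil_rest (phlA_spanMinus (l :: ls)).2 hadds
        rw [h2] at hx
        have thisC : PySem.Chars.startswith x.toList ['-'] = false :=
          phlA_spanMinus_rest_head (l :: ls) x hx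
        simp [thisC] at hmm)]
    rw [ih (recs ++ [(old, new, (phlA_spanMinus (l :: ls)).1, (phlA_spanPlus (phlA_spanMinus (l :: ls)).2).1)])
      (fun x hx => hgood x (phlA_spanMinus_rest_mem _ x (phlA_spanPlus_rest_mem _ x hx)))]
    simp
  | case4 l ls old new hsp hlt =>
    exfalso
    exact hlt (phl_span_progress l ls (hgood l (List.mem_cons_self ..)) hsp)

-- ===== VERDICT (by name: the statement is the Claim_ definition above) =====
theorem process_hunk_lines_spec : Claim_equal_process_hunk_lines := by
  intro hunk_lines start_old start_new _hdom hpre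
  unfold Spec_process_hunk_lines
  rw [process_hunk_lines, process_hunk_lines_alt]
  rw [phlA_loop_eq _ _ _ _ _ hpre (by omega)]
  rw [PySem.List.foldl_append_eq_flatMap]
  have hb := phlB_fold_eq hunk_lines start_old start_new [] hpre
  unfold phlRecsOf at hb
  rw [hb]
  simp
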